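-- pv_equiv track=rewrite | github.com/lpawlak1/WDI | Cwiczenia 3/cw15.py | F
-- ===== SOURCE A (Python) =====
-- def czy_pierwsza(num):
--     if num <= 1:
--         return False
--     if num == 2 or num == 3:
--         return True
--     if num % 2 == 0 or num % 3 == 0:
--         return False
--     i = 6
--     while (i-1)**2 < num:
--         if num % (i-1) == 0 or num % (i+1) == 0:
--             return False
--         i += 6
--     return True
--
-- def F(t):
--     a1, a2 = 1, 1
--     last_index = 0
--     flag = False
--     while a2 < len(t):
--         if not flag:
--             while last_index != a2:
--                 if last_index != a1:
--                     if czy_pierwsza(t[last_index]):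
--                         flag = True
--                 last_index += 1
--         if czy_pierwsza(t[a2]):
--             return False
--         a1, a2 = a2, a1+a2
--     return flag
-- ===== SOURCE B (Python) =====
-- def czy_pierwsza(num):
--     if num <= 1:
--         return False
--     if num == 2 or num == 3:
--         return True
--     if num % 2 == 0 or num % 3 == 0:
--         return False
--     i = 6
--     while (i-1)**2 < num:
--         if num % (i-1) == 0 or num % (i+1) == 0:
--             return False
--         i += 6
--     return True
--
-- def F(t):
--     fibs = []
--     a1, a2 = 1, 1
--     while a2 < len(t):
--         fibs.append(a2)
--         a1, a2 = a2, a1 + a2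
--     if any(czy_pierwsza(t[i]) for i in fibs):
--         return False
--     last = fibs[-1] if fibs else 0
--     return any(czy_pierwsza(t[j]) for j in range(last) if j not in fibs)
-- ===== Notes on version B (the rewrite author's own statement) =====
-- stated objective: simpler
-- what changed: A's single loop with two interlocking cursors (a1/a2/last_index) and a flag state machine is replaced by precomputing the list of Fibonacci indices < len(t) once and then making two independent passes: any-prime over the Fibonacci indices (-> False), else any-prime over the non-Fibonacci indices below the largest Fibonacci index (-> True).
import Mathlib
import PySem

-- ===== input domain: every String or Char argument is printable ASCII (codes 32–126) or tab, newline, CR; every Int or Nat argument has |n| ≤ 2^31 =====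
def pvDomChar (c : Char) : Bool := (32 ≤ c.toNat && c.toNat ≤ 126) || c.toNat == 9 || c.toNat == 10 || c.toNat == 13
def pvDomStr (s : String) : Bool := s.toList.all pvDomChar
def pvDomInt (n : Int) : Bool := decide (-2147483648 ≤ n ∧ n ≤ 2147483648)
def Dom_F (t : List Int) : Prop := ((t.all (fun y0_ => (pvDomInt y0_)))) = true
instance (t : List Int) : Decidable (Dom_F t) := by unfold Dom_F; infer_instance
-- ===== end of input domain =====

-- B replaces A's two interlocking cursors (a1/a2/last_index/flag state machine) by a
-- precomputed list of Fibonacci indices and two independent passes (objective: simpler).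

-- ===== PORT A =====

-- helper czy_pierwsza: the trial-division loop `while (i-1)**2 < num: ...`
def czyLoop (num i : Int) : Bool :=
  if (i - 1) ^ 2 < num then
    if PySem.Int.mod num (i - 1) = 0 ∨ PySem.Int.mod num (i + 1) = 0 then false
    else czyLoop num (i + 6)
  else true
termination_by (num + 1 - i).toNat
decreasing_by
  have h1 : (i - 1) ≤ (i - 1) ^ 2 := Int.le_self_sq (i - 1)
  omega

def czyPierwsza (num : Int) : Bool :=
  if num ≤ 1 then false
  else if num = 2 ∨ num = 3 then true
  else if PySem.Int.mod num 2 = 0 ∨ PySem.Int.mod num 3 = 0 then false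
  else czyLoop num 6

-- A's inner `while last_index != a2` scan.  A maintains last_index ≤ a2, so the
-- Python test `last_index != a2` is written `li < a2` (identical wherever Python terminates).
def scanA (t : List Int) (a1 a2 li : Int) (flag : Bool) : Int × Bool :=
  if li < a2 then
    scanA t a1 a2 (li + 1)
      (if li ≠ a1 then (if czyPierwsza (PySem.List.pyGetD t li 0) then true else flag) else flag)
  else (li, flag)
termination_by (a2 - li).toNat
decreasing_by omega

-- A's outer `while a2 < len(t)` loop; the proof arguments 1 ≤ a1 ≤ a2 only justify termination.
def loopA (t : List Int) (a1 a2 li : Int) (flag : Bool) (h1 : 1 ≤ a1) (h2 : a1 ≤ a2) : Bool :=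
  if h : a2 < (t.length : Int) then
    let p := if flag = false then scanA t a1 a2 li flag else (li, flag)
    if czyPierwsza (PySem.List.pyGetD t a2 0) then false
    else loopA t a2 (a1 + a2) p.1 p.2 (by omega) (by omega)
  else flag
termination_by ((t.length : Int) - a2).toNat
decreasing_by omega

def F (t : List Int) : Bool := loopA t 1 1 0 false (by omega) (by omega)

-- ===== PORT B =====

-- Source B's `while a2 < len(t): fibs.append(a2); a1, a2 = a2, a1 + a2`
-- (the proof arguments 1 ≤ a1 ≤ a2 only justify termination).
def fibsB (n a1 a2 : Int) (h1 : 1 ≤ a1) (h2 : a1 ≤ a2) : List Int :=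
  if a2 < n then a2 :: fibsB n a2 (a1 + a2) (by omega) (by omega) else []
termination_by (n - a2).toNat
decreasing_by omega

def F_alt (t : List Int) : Bool :=
  let fibs := fibsB (t.length : Int) 1 1 (by omega) (by omega)
  if fibs.any (fun i => czyPierwsza (PySem.List.pyGetD t i 0)) then false
  else
    let last := fibs.getLastD 0   -- fibs[-1] if fibs else 0
    (PySem.List.pyRange 0 last 1).any
      (fun j => !(fibs.contains j) && czyPierwsza (PySem.List.pyGetD t j 0))

-- ===== PRECONDITION & SPEC =====
def Spec_F (t : List Int) (out : Bool) : Prop := out = F_alt t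
instance (t : List Int) (out : Bool) : Decidable (Spec_F t out) := by unfold Spec_F; infer_instance

-- ===== CLAIM (what is proved, stated in full; the proofs are below) =====
def Claim_equal_F : Prop := ∀ (t : List Int), Dom_F t → Spec_F t (F t)

-- ===== LEMMAS AND PROOFS =====

-- every element of fibsB is ≥ a2
theorem fibsB_lb (n : Int) : ∀ (m : Nat) (a1 a2 : Int) (h1 : 1 ≤ a1) (h2 : a1 ≤ a2),
    (n - a2).toNat = m → ∀ x ∈ fibsB n a1 a2 h1 h2, a2 ≤ x := by
  intro m
  induction m using Nat.strong_induction_on with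
  | _ m ih =>
    intro a1 a2 h1 h2 hm x hx
    rw [fibsB] at hx
    split at hx
    · rcases List.mem_cons.1 hx with rfl | hx'
      · omega
      · have := ih ((n - (a1 + a2)).toNat) (by omega) a2 (a1 + a2) (by omega) (by omega) rfl x hx'
        omega
    · simp at hx

theorem fibsB_getLastD_ge (n a1 a2 : Int) (h1 : 1 ≤ a1) (h2 : a1 ≤ a2) (d : Int)
    (hd : d ≤ a2) : d ≤ (fibsB n a1 a2 h1 h2).getLastD d := by
  rcases h : fibsB n a1 a2 h1 h2 with _ | ⟨y, ys⟩
  · simp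
  · have hm2 : (y :: ys).getLastD d ∈ (y :: ys) := by
      rw [List.getLastD_cons]
      exact List.getLastD_mem_cons ..
    rw [← h] at hm2
    have hle := fibsB_lb n _ a1 a2 h1 h2 rfl _ hm2
    rw [h] at hle
    omega

-- the inner scan: first component
theorem scanA_fst (t : List Int) (a1 a2 : Int) : ∀ (m : Nat) (li : Int) (flag : Bool),
    (a2 - li).toNat = m → li ≤ a2 → (scanA t a1 a2 li flag).1 = a2 := by
  intro m
  induction m using Nat.strong_induction_on with
  | _ m ih =>
    intro li flag hm hle
    rw [scanA]
    split
    · exact ih ((a2 - (li + 1)).toNat) (by omega) (li + 1) _ rfl (by omega)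
    · simp; omega

-- the inner scan: the flag it produces
theorem scanA_snd (t : List Int) (a1 a2 : Int) : ∀ (m : Nat) (li : Int) (flag : Bool),
    (a2 - li).toNat = m →
    ((scanA t a1 a2 li flag).2 = true ↔
      flag = true ∨ ∃ j, li ≤ j ∧ j < a2 ∧ j ≠ a1 ∧ czyPierwsza (PySem.List.pyGetD t j 0) = true) := by
  intro m
  induction m using Nat.strong_induction_on with
  | _ m ih =>
    intro li flag hm
    rw [scanA]
    split
    · rw [ih ((a2 - (li + 1)).toNat) (by omega) (li + 1) _ rfl]
      constructor
      · rintro (hf | ⟨j, hj1, hj2, hj3, hj4⟩)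
        · split at hf
          · split at hf
            · exact Or.inr ⟨li, by omega, by omega, by assumption, by assumption⟩
            · exact Or.inl hf
          · exact Or.inl hf
        · exact Or.inr ⟨j, by omega, hj2, hj3, hj4⟩
      · rintro (hf | ⟨j, hj1, hj2, hj3, hj4⟩)
        · left; split <;> [skip; exact hf]; split <;> [rfl; exact hf]
        · by_cases hz : j = li
          · subst hz; left
            rw [if_pos hj3, if_pos hj4]
          · exact Or.inr ⟨j, by omega, hj2, hj3, hj4⟩
    · constructor
      · intro hf; exact Or.inl hf
      · rintro (hf | ⟨j, hj1, hj2, _, _⟩)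
        · exact hf
        · omega

-- the outer loop once the flag is set: only the Fibonacci-index checks remain
theorem loopA_true (t : List Int) : ∀ (m : Nat) (a1 a2 li : Int) (h1 : 1 ≤ a1) (h2 : a1 ≤ a2),
    (((t.length : Int)) - a2).toNat = m →
    (loopA t a1 a2 li true h1 h2 = true ↔
      ∀ i ∈ fibsB (t.length : Int) a1 a2 h1 h2, czyPierwsza (PySem.List.pyGetD t i 0) = false) := by
  intro m
  induction m using Nat.strong_induction_on with
  | _ m ih =>
    intro a1 a2 li h1 h2 hm
    rw [loopA, fibsB]
    split
    · simp only [Bool.true_eq_false, reduceIte]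
      split
      · rename_i hprime
        simp only [Bool.false_eq_true, false_iff]
        intro hall
        have hx := hall a2 List.mem_cons_self
        rw [hprime] at hx
        exact absurd hx (by simp)
      · rename_i hnprime
        simp only [Bool.not_eq_true] at hnprime
        rw [ih ((((t.length : Int)) - (a1 + a2)).toNat) (by omega) a2 (a1 + a2) li (by omega) (by omega) rfl]
        constructor
        · intro hall i hi
          rcases List.mem_cons.1 hi with rfl | hi'
          · exact hnprime
          · exact hall i hi'
        · intro hall i hi
          exact hall i (List.mem_cons_of_mem _ hi)
    · simp

-- the main characterisation of A's loop while the flag is still clear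
theorem loopA_false (t : List Int) : ∀ (m : Nat) (a1 a2 li : Int) (h1 : 1 ≤ a1) (h2 : a1 ≤ a2),
    (((t.length : Int)) - a2).toNat = m → li ≤ a2 →
    (loopA t a1 a2 li false h1 h2 = true ↔
      (∀ i ∈ fibsB (t.length : Int) a1 a2 h1 h2, czyPierwsza (PySem.List.pyGetD t i 0) = false) ∧
      ∃ j, li ≤ j ∧ j < (fibsB (t.length : Int) a1 a2 h1 h2).getLastD li ∧ j ≠ a1 ∧
           j ∉ fibsB (t.length : Int) a1 a2 h1 h2 ∧ czyPierwsza (PySem.List.pyGetD t j 0) = true) := by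
  intro m
  induction m using Nat.strong_induction_on with
  | _ m ih =>
    intro a1 a2 li h1 h2 hm hli
    rw [loopA, fibsB]
    split
    · rename_i hlt
      simp only [reduceIte]
      have hfst := scanA_fst t a1 a2 _ li false rfl hli
      split
      · rename_i hprime
        simp only [Bool.false_eq_true, false_iff, not_and, not_exists]
        intro hall
        exact absurd (hall a2 (List.mem_cons_self)) (by simp [hprime])
      · rename_i hnotprime
        rw [List.getLastD_cons]
        rcases hsnd : (scanA t a1 a2 li false).2 with _ | _
        · -- flag stays clear: use the IH
          rw [hfst]
          rw [ih ((((t.length : Int)) - (a1 + a2)).toNat) (by omega) a2 (a1 + a2) a2 (by omega) (by omega) rfl (by omega)]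
          have hnoscan : ¬ ∃ j, li ≤ j ∧ j < a2 ∧ j ≠ a1 ∧ czyPierwsza (PySem.List.pyGetD t j 0) = true := by
            intro hex
            have := (scanA_snd t a1 a2 _ li false rfl).2 (Or.inr hex)
            simp [hsnd] at this
          constructor
          · rintro ⟨hall, j, hj1, hj2, hj3, hj4, hj5⟩
            refine ⟨?_, j, by omega, hj2, ?_, ?_, hj5⟩
            · intro i hi
              rcases List.mem_cons.1 hi with rfl | hi'
              · simp [hnotprime]
              · exact hall i hi'
            · intro hja1; exact hj3 (by omega)
            · intro hjmem
              rcases List.mem_cons.1 hjmem with rfl | hjmem'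
              · exact hj3 rfl
              · exact hj4 hjmem'
          · rintro ⟨hall, j, hj1, hj2, hj3, hj4, hj5⟩
            have hja2 : a2 ≤ j := by
              by_contra hcon
              exact hnoscan ⟨j, hj1, by omega, hj3, hj5⟩
            have hjne : j ≠ a2 := fun h => hj4 (by rw [h]; exact List.mem_cons_self)
            refine ⟨fun i hi => hall i (List.mem_cons_of_mem _ hi),
                    j, by omega, hj2, hjne, fun hmem => hj4 (List.mem_cons_of_mem _ hmem), hj5⟩
        · -- flag was set during the scan
          rw [hfst]
          rw [loopA_true t ((((t.length : Int)) - (a1 + a2)).toNat) a2 (a1 + a2) a2 (by omega) (by omega) rfl]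
          obtain ⟨j0, hj01, hj02, hj03, hj04⟩ :
              ∃ j, li ≤ j ∧ j < a2 ∧ j ≠ a1 ∧ czyPierwsza (PySem.List.pyGetD t j 0) = true := by
            have := (scanA_snd t a1 a2 _ li false rfl).1 hsnd
            rcases this with h | h
            · simp at h
            · exact h
          have hLge : a2 ≤ (fibsB (t.length : Int) a2 (a1 + a2) (by omega) (by omega)).getLastD a2 :=
            fibsB_getLastD_ge _ a2 (a1 + a2) _ _ a2 (by omega)
          constructor
          · intro hall
            refine ⟨?_, j0, hj01, by omega, hj03, ?_, hj04⟩
            · intro i hi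
              rcases List.mem_cons.1 hi with rfl | hi'
              · simp [hnotprime]
              · exact hall i hi'
            · intro hmem
              rcases List.mem_cons.1 hmem with rfl | hmem'
              · omega
              · have := fibsB_lb ((t.length : Int)) _ a2 (a1 + a2) (by omega) (by omega) rfl j0 hmem'
                omega
          · rintro ⟨hall, _⟩
            exact fun i hi => hall i (List.mem_cons_of_mem _ hi)
    · simp only [Bool.false_eq_true, false_iff]
      rintro ⟨-, j, hj1, hj2, -⟩
      simp only [List.getLastD_nil] at hj2
      omega

-- B's result, characterised the same way
theorem F_alt_iff (t : List Int) :
    (F_alt t = true ↔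
      (∀ i ∈ fibsB (t.length : Int) 1 1 (by omega) (by omega), czyPierwsza (PySem.List.pyGetD t i 0) = false) ∧
      ∃ j, (0 : Int) ≤ j ∧ j < (fibsB (t.length : Int) 1 1 (by omega) (by omega)).getLastD 0 ∧
           j ∉ fibsB (t.length : Int) 1 1 (by omega) (by omega) ∧
           czyPierwsza (PySem.List.pyGetD t j 0) = true) := by
  simp only [F_alt]
  split
  · rename_i hany
    simp only [Bool.false_eq_true, false_iff, not_and]
    intro hall
    rcases List.any_eq_true.1 hany with ⟨i, hi, hprime⟩
    exact absurd (hall i hi) (by simp [hprime])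
  · rename_i hnotany
    rw [List.any_eq_true]
    constructor
    · rintro ⟨j, hjmem, hj⟩
      rw [PySem.List.mem_pyRange_one] at hjmem
      rw [Bool.and_eq_true] at hj
      obtain ⟨hnc, hcp⟩ := hj
      refine ⟨?_, j, hjmem.1, hjmem.2, ?_, hcp⟩
      · intro i hi
        by_contra hcon
        exact hnotany (List.any_eq_true.2 ⟨i, hi, by simpa using hcon⟩)
      · intro hmem
        simp only [Bool.not_eq_true'] at hnc
        exact absurd hmem (by simpa using hnc)
    · rintro ⟨_, j, hj0, hjL, hjmem, hcp⟩
      refine ⟨j, PySem.List.mem_pyRange_one.2 ⟨hj0, hjL⟩, ?_⟩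
      rw [Bool.and_eq_true]
      exact ⟨by simp [hjmem], hcp⟩

-- ===== VERDICT (by name: the statement is the Claim_ definition above) =====
theorem F_spec : Claim_equal_F := by
  intro t _
  unfold Spec_F F
  rw [Bool.eq_iff_iff]
  rw [loopA_false t (((t.length : Int)) - 1).toNat 1 1 0 (by omega) (by omega) rfl (by omega)]
  rw [F_alt_iff t]
  have key : ∀ j : Int, j ∉ fibsB (t.length : Int) 1 1 (by omega) (by omega) →
      j < (fibsB (t.length : Int) 1 1 (by omega) (by omega)).getLastD 0 → (0:Int) ≤ j → j ≠ 1 := by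
    intro j hjmem hjL hj0
    rcases hfib : fibsB (t.length : Int) 1 1 (by omega) (by omega) with _ | ⟨y, ys⟩
    · rw [hfib] at hjL; simp at hjL; omega
    · have h1mem : (1 : Int) ∈ fibsB (t.length : Int) 1 1 (by omega) (by omega) := by
        rw [fibsB] at hfib ⊢
        split at hfib
        · rw [if_pos (by assumption)]; exact List.mem_cons_self
        · simp at hfib
      exact fun h => hjmem (by rw [h]; exact h1mem)
  constructor
  · rintro ⟨hall, j, hj1, hj2, hj3, hj4, hj5⟩
    exact ⟨hall, j, hj1, hj2, hj4, hj5⟩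
  · rintro ⟨hall, j, hj1, hj2, hj3, hj4⟩
    exact ⟨hall, j, hj1, hj2, key j hj3 hj2 hj1, hj3, hj4⟩
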